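-- pv_equiv track=rewrite | github.com/martinbaros/competitive | CodeJam/2020/1C/2/solution.py | treba
-- ===== SOURCE A (Python) =====
-- def treba(vysledok):
--     je = False
--     todo = []
--     pocty = []
--     for qql in range(26):
--         riesene = chr(qql+65)
--         pocet = vysledok.count(riesene)
--         if pocet > 1:
--             je = True
--             if riesene not in todo:
--                 todo.append(riesene)
--                 pocty.append(pocet)
--     return [je,todo,pocty]
-- ===== SOURCE B (Python) =====
-- def treba(vysledok):
--     je = False
--     todo = []
--     pocty = []
--     s = sorted(vysledok)
--     while s:
--         c = s[0]
--         k = 1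
--         while k < len(s) and s[k] == c:
--             k += 1
--         if 'A' <= c <= 'Z' and k > 1:
--             je = True
--             todo.append(c)
--             pocty.append(k)
--         s = s[k:]
--     return [je, todo, pocty]
-- ===== Notes on version B (the rewrite author's own statement) =====
-- stated objective: alternative
-- what changed: Replaces A's 26 per-letter vysledok.count scans (with a redundant todo membership test) by sorting the characters once and scanning the sorted sequence in runs of identical characters, emitting each uppercase run of length > 1; sorting makes todo alphabetical by construction.
import Mathlib
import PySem

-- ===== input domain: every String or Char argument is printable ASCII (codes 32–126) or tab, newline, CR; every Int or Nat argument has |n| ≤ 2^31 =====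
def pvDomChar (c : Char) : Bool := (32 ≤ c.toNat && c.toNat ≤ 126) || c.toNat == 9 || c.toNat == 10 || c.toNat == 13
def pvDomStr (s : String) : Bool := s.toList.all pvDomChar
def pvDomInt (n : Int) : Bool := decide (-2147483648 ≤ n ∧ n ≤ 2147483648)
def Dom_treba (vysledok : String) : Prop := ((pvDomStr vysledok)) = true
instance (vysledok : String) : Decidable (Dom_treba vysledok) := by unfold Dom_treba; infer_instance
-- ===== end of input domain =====

-- B sorts the characters once and scans runs of identical characters (emitting uppercase
-- runs of length > 1) instead of A's 26 per-letter vysledok.count scans; alternative algorithm.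


-- ===== PORT A =====
-- one iteration of A's 'for qql in range(26)' loop body
def trebaStep (vysledok : String) (st : Bool × List String × List Int) (qql : Int) :
    Bool × List String × List Int :=
  let riesene := String.ofList [Char.ofNat (qql + 65).toNat]
  let pocet : Int := (PySem.Str.count vysledok riesene : Int)
  if 1 < pocet then
    if riesene ∈ st.2.1 then (true, st.2.1, st.2.2)
    else (true, st.2.1 ++ [riesene], st.2.2 ++ [pocet])
  else st

def treba (vysledok : String) : Bool × List String × List Int :=
  (PySem.List.pyRange 0 26 1).foldl (trebaStep vysledok) (false, [], [])

-- ===== PORT B =====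
-- B's outer 'while s:' loop: take the run of the leading character c (the inner
-- 'while k < len(s) and s[k] == c: k += 1' computes k = 1 + length of the equal prefix of
-- the tail, so s[k:] is the tail with that prefix dropped), emit if uppercase and k > 1.
def trebaRun (l : List Char) (st : Bool × List String × List Int) :
    Bool × List String × List Int :=
  match l with
  | [] => st
  | c :: t =>
    let k : Int := 1 + ((t.takeWhile (fun x => x == c)).length : Int)
    let st' := if 'A' ≤ c ∧ c ≤ 'Z' ∧ 1 < k then
        (true, st.2.1 ++ [String.ofList [c]], st.2.2 ++ [k]) else st
    trebaRun (t.dropWhile (fun x => x == c)) st'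
  termination_by l.length
  decreasing_by
    simp only [List.length_cons]
    exact Nat.lt_succ_of_le (t.dropWhile_sublist _).length_le

-- sorted(vysledok): Python's default character comparison is code-point order = Char.toNat
def treba_alt (vysledok : String) : Bool × List String × List Int :=
  trebaRun (PySem.List.sorted vysledok.toList (fun c => c.toNat) false) (false, [], [])

-- ===== PRECONDITION & SPEC =====
def Spec_treba (vysledok : String) (out : Bool × List String × List Int) : Prop := out = treba_alt vysledok
instance (vysledok : String) (out : Bool × List String × List Int) : Decidable (Spec_treba vysledok out) := by unfold Spec_treba; infer_instance

-- ===== CLAIM (what is proved, stated in full; the proofs are below) =====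
def Claim_equal_treba : Prop := ∀ (vysledok : String), Dom_treba vysledok → Spec_treba vysledok (treba vysledok)

-- ===== LEMMAS AND PROOFS =====

-- common emitting step: both programs append (letter, count) pairs and set je := true
def emit (st : Bool × List String × List Int) (e : Char × Int) :
    Bool × List String × List Int :=
  (true, st.2.1 ++ [String.ofList [e.1]], st.2.2 ++ [e.2])

-- the (letter, run length) pairs B's run scan emits
def runsOf (l : List Char) : List (Char × Int) :=
  match l with
  | [] => []
  | c :: t =>
    let k : Int := 1 + ((t.takeWhile (fun x => x == c)).length : Int)
    (if 'A' ≤ c ∧ c ≤ 'Z' ∧ 1 < k then [(c, k)] else []) ++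
      runsOf (t.dropWhile (fun x => x == c))
  termination_by l.length
  decreasing_by
    simp only [List.length_cons]
    exact Nat.lt_succ_of_le (t.dropWhile_sublist _).length_le

-- the (letter, count) pairs A's loop emits, as a filterMap over the letter indices
def emitA (v : String) (q : Int) : Option (Char × Int) :=
  let k : Int := (PySem.Str.count v (String.ofList [Char.ofNat (q + 65).toNat]) : Int)
  if 1 < k then some (Char.ofNat (q + 65).toNat, k) else none

lemma toNat_ofNat_small (n : Nat) (h : n < 55296) : (Char.ofNat n).toNat = n := by
  rw [Char.toNat_ofNat]
  exact if_pos (Or.inl h)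

-- Python's s.count(sub) for a single-character sub is the plain character count
lemma countGo_single (c : Char) : ∀ (l : List Char) (fuel acc : Nat), l.length ≤ fuel →
    PySem.Chars.count.go [c] fuel l acc = acc + l.count c := by
  intro l
  induction l with
  | nil => intro fuel acc _; cases fuel <;> simp [PySem.Chars.count.go]
  | cons ch t ih =>
    intro fuel acc hf
    cases fuel with
    | zero => simp at hf
    | succ fuel =>
      simp only [PySem.Chars.count.go]
      by_cases hc : ch = c
      · subst hc
        have hpre : [ch].isPrefixOf (ch :: t) = true := by simp [List.isPrefixOf]
        simp only [hpre, if_true, List.length_cons, List.length_nil, List.drop_succ_cons,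
          List.drop_zero]
        rw [ih fuel (acc + 1) (by simpa using hf)]
        simp
        omega
      · have hpre : [c].isPrefixOf (ch :: t) = false := by
          simp [List.isPrefixOf]
          exact fun h => hc h.symm
        simp only [hpre, Bool.false_eq_true, if_false]
        rw [ih fuel acc (by simpa using hf)]
        simp [hc]

lemma count_single (s : List Char) (c : Char) : PySem.Chars.count s [c] = s.count c := by
  unfold PySem.Chars.count
  simp [countGo_single c s s.length 0 le_rfl]

lemma str_count_single (v : String) (c : Char) :
    PySem.Str.count v (String.ofList [c]) = v.toList.count c := by
  simp [count_single]

-- the letters A..Z are pairwise distinct strings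
lemma letter_inj (p q : Int) (hp : 0 ≤ p) (hq : 0 ≤ q) (hp26 : p < 26) (hq26 : q < 26)
    (h : String.ofList [Char.ofNat (p + 65).toNat] = String.ofList [Char.ofNat (q + 65).toNat]) :
    p = q := by
  have := congrArg String.toList h
  simp only [String.toList_ofList, List.cons.injEq] at this
  have h1 : (Char.ofNat (p + 65).toNat).toNat = (p + 65).toNat :=
    toNat_ofNat_small _ (by omega)
  have h2 : (Char.ofNat (q + 65).toNat).toNat = (q + 65).toNat :=
    toNat_ofNat_small _ (by omega)
  have := congrArg Char.toNat this.1
  rw [h1, h2] at this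
  omega

-- B's run scan is the emit-fold of its run list
lemma trebaRun_eq_foldl : ∀ (n : Nat) (l : List Char) (st : Bool × List String × List Int),
    l.length ≤ n → trebaRun l st = (runsOf l).foldl emit st := by
  intro n
  induction n with
  | zero =>
    intro l st h
    have hl : l = [] := List.eq_nil_of_length_eq_zero (Nat.le_zero.mp h)
    subst hl
    simp [trebaRun, runsOf]
  | succ n ih =>
    intro l st h
    cases l with
    | nil => simp [trebaRun, runsOf]
    | cons c t =>
      rw [trebaRun, runsOf]
      have hlen : (t.dropWhile (fun x => x == c)).length ≤ n :=
        le_trans (t.dropWhile_sublist _).length_le (by simpa using Nat.le_of_succ_le_succ h)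
      by_cases hc : 'A' ≤ c ∧ c ≤ 'Z' ∧ 1 < (1 + ((t.takeWhile (fun x => x == c)).length : Int))
      · simp only [if_pos hc, List.singleton_append, List.foldl_cons]
        exact ih _ _ hlen
      · simp only [if_neg hc, List.nil_append]
        exact ih _ _ hlen

-- A's loop is the emit-fold of its (letter, count) list: the membership test never fires
lemma treba_eq_foldl (v : String) :
    ∀ (n : Nat) (a : Int) (je : Bool) (todo : List String) (pocty : List Int),
    0 ≤ a → a + n ≤ 26 →
    (∀ s ∈ todo, ∃ p : Int, 0 ≤ p ∧ p < a ∧ s = String.ofList [Char.ofNat (p + 65).toNat]) →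
    (PySem.List.pyRange a (a + n) 1).foldl (trebaStep v) (je, todo, pocty) =
      ((PySem.List.pyRange a (a + n) 1).filterMap (emitA v)).foldl emit (je, todo, pocty) := by
  intro n
  induction n with
  | zero =>
    intro a je todo pocty _ _ _
    simp [PySem.List.pyRange_one_eq_nil]
  | succ n ih =>
    intro a je todo pocty ha hb hinv
    rw [PySem.List.pyRange_one_cons (by omega : a < a + (n + 1 : Nat))]
    have hrange : a + 1 + (n : Int) = a + ((n + 1 : Nat) : Int) := by push_cast; ring
    simp only [List.foldl_cons, List.filterMap_cons]
    by_cases hgt : (1:Int) <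
        (PySem.Str.count v (String.ofList [Char.ofNat (a + 65).toNat]) : Int)
    · have hmem : String.ofList [Char.ofNat (a + 65).toNat] ∉ todo := by
        intro hm
        obtain ⟨p, hp0, hpa, hps⟩ := hinv _ hm
        have := letter_inj p a hp0 ha (by omega) (by omega) hps.symm
        omega
      have stepA : trebaStep v (je, todo, pocty) a =
          (true, todo ++ [String.ofList [Char.ofNat (a + 65).toNat]],
            pocty ++ [(PySem.Str.count v (String.ofList [Char.ofNat (a + 65).toNat]) : Int)]) := by
        simp only [trebaStep]
        rw [if_pos hgt, if_neg hmem]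
      have stepE : emitA v a = some (Char.ofNat (a + 65).toNat,
          (PySem.Str.count v (String.ofList [Char.ofNat (a + 65).toNat]) : Int)) := by
        simp only [emitA]
        rw [if_pos hgt]
      rw [stepA, stepE]
      simp only [List.foldl_cons]
      rw [← hrange]
      have := ih (a + 1)
        true (todo ++ [String.ofList [Char.ofNat (a + 65).toNat]])
        (pocty ++ [(PySem.Str.count v (String.ofList [Char.ofNat (a + 65).toNat]) : Int)])
        (by omega) (by omega) ?_
      · exact this
      · intro s hs
        rcases List.mem_append.mp hs with h | h
        · obtain ⟨p, h1, h2, h3⟩ := hinv s h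
          exact ⟨p, h1, by omega, h3⟩
        · exact ⟨a, ha, by omega, by simpa using h⟩
    · have stepA : trebaStep v (je, todo, pocty) a = (je, todo, pocty) := by
        simp only [trebaStep]
        rw [if_neg hgt]
      have stepE : emitA v a = none := by
        simp only [emitA]
        rw [if_neg hgt]
      rw [stepA, stepE, ← hrange]
      exact ih (a + 1) je todo pocty (by omega) (by omega)
        (fun s hs => by
          obtain ⟨p, h1, h2, h3⟩ := hinv s hs
          exact ⟨p, h1, by omega, h3⟩)

lemma char_toNat_inj {a b : Char} (h : a.toNat = b.toNat) : a = b :=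
  Char.ext (UInt32.toNat_inj.mp h)

lemma char_upper_iff (c : Char) : ('A' ≤ c ∧ c ≤ 'Z') ↔ (65 ≤ c.toNat ∧ c.toNat ≤ 90) := Iff.rfl

-- in a sorted tail bounded below by c, dropping the leading c-run removes every c
lemma not_mem_dropWhile (c : Char) : ∀ (t : List Char),
    (∀ x ∈ t, c.toNat ≤ x.toNat) → t.Pairwise (fun x y => x.toNat ≤ y.toNat) →
    c ∉ t.dropWhile (fun x => x == c) := by
  intro t
  induction t with
  | nil => intro _ _; simp
  | cons x t' ih =>
    intro hlb hpw
    rw [List.pairwise_cons] at hpw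
    by_cases hx : x = c
    · subst hx
      rw [List.dropWhile_cons_of_pos (by simp)]
      exact ih (fun y hy => hlb y (List.mem_cons_of_mem _ hy)) hpw.2
    · rw [List.dropWhile_cons_of_neg (by simp [hx])]
      intro hmem
      rcases List.mem_cons.mp hmem with h | h
      · exact hx h.symm
      · have h1 : c.toNat ≤ x.toNat := hlb x (List.mem_cons_self)
        have h2 : x.toNat ≤ c.toNat := hpw.1 c h
        exact hx (char_toNat_inj (le_antisymm h2 h1))

lemma letter_toNat (q : Int) (h0 : 0 ≤ q) (h26 : q < 26) :
    ((Char.ofNat (q + 65).toNat).toNat : Int) = q + 65 := by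
  rw [toNat_ofNat_small _ (by omega)]
  omega

lemma runsOf_sorted_aux : ∀ (m n : Nat) (a : Int) (l : List Char),
    n + l.length ≤ m → 0 ≤ a → a + n = 26 →
    l.Pairwise (fun x y => x.toNat ≤ y.toNat) →
    (∀ c ∈ l, 'A' ≤ c → c ≤ 'Z' → a + 65 ≤ (c.toNat : Int)) →
    runsOf l = (PySem.List.pyRange a 26 1).filterMap (fun q =>
      let k : Int := (l.count (Char.ofNat (q + 65).toNat) : Int)
      if 1 < k then some (Char.ofNat (q + 65).toNat, k) else none) := by
  intro m
  induction m with
  | zero =>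
    intro n a l hm h0 h26 _ _
    have hl : l = [] := List.eq_nil_of_length_eq_zero (by omega)
    subst hl
    rw [runsOf]
    symm
    apply List.filterMap_eq_nil_iff.mpr
    intro q _
    simp
  | succ m ih =>
    intro n a l hm h0 h26 hpw hub
    cases l with
    | nil =>
      rw [runsOf]
      symm
      apply List.filterMap_eq_nil_iff.mpr
      intro q _
      simp
    | cons c t =>
      rw [List.pairwise_cons] at hpw
      have hmin : ∀ x ∈ t, c.toNat ≤ x.toNat := hpw.1
      have htw : ∀ x ∈ t.takeWhile (fun x => x == c), x = c := by
        intro x hx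
        have := List.mem_takeWhile_imp hx
        simpa using this
      have hrest_sub : (t.dropWhile (fun x => x == c)).Sublist t := t.dropWhile_sublist _
      have hrest_pw : (t.dropWhile (fun x => x == c)).Pairwise (fun x y => x.toNat ≤ y.toNat) :=
        hpw.2.sublist hrest_sub
      have hrest_lb : ∀ x ∈ t.dropWhile (fun x => x == c), c.toNat ≤ x.toNat :=
        fun x hx => hmin x (hrest_sub.mem hx)
      have hnotc : c ∉ t.dropWhile (fun x => x == c) := not_mem_dropWhile c t hmin hpw.2
      have hsplit : t.takeWhile (fun x => x == c) ++ t.dropWhile (fun x => x == c) = t :=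
        List.takeWhile_append_dropWhile
      -- count of c in l is the run length; count of any other char ignores the run
      have htc : t.count c = (t.takeWhile (fun x => x == c)).length := by
        conv_lhs => rw [← hsplit]
        rw [List.count_append, List.count_eq_length.mpr (fun b hb => (htw b hb).symm),
          List.count_eq_zero.mpr hnotc]
        omega
      have hcount_c : (c :: t).count c = 1 + (t.takeWhile (fun x => x == c)).length := by
        rw [List.count_cons_self, htc]
        omega
      have hcount_ne : ∀ ch, ch ≠ c →
          (c :: t).count ch = (t.dropWhile (fun x => x == c)).count ch := by
        intro ch hne
        have htch : t.count ch = (t.dropWhile (fun x => x == c)).count ch := by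
          conv_lhs => rw [← hsplit]
          rw [List.count_append,
            List.count_eq_zero.mpr (fun hmem => hne (htw ch hmem))]
          omega
        rw [List.count_cons, htch]
        simp [Ne.symm hne]
      have hrest_len : (t.dropWhile (fun x => x == c)).length ≤ t.length :=
        hrest_sub.length_le
      by_cases hup : 'A' ≤ c ∧ c ≤ 'Z'
      · have hcb : 65 ≤ c.toNat ∧ c.toNat ≤ 90 := (char_upper_iff c).mp hup
        have hge : a + 65 ≤ (c.toNat : Int) := hub c List.mem_cons_self hup.1 hup.2
        have ha26 : a < 26 := by omega
        have hn1 : 1 ≤ n := by omega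
        -- every element of the dropped rest is strictly above c
        have hrest_gt : ∀ x ∈ t.dropWhile (fun x => x == c), c.toNat < x.toNat := by
          intro x hx
          rcases Nat.lt_or_ge c.toNat x.toNat with h | h
          · exact h
          · have : c.toNat = x.toNat := le_antisymm (hrest_lb x hx) h
            exact absurd (char_toNat_inj this).symm (fun he => hnotc (he ▸ hx))
        rw [PySem.List.pyRange_one_cons ha26, List.filterMap_cons]
        by_cases heq : (c.toNat : Int) = a + 65
        · -- head run is exactly letter a
          have hletter : Char.ofNat (a + 65).toNat = c := by
            apply char_toNat_inj
            rw [toNat_ofNat_small _ (by omega)]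
            omega
          have hcnt : ((c :: t).count (Char.ofNat (a + 65).toNat) : Int) =
              1 + ((t.takeWhile (fun x => x == c)).length : Int) := by
            rw [hletter, hcount_c]; push_cast; ring
          have htail : (PySem.List.pyRange (a + 1) 26 1).filterMap (fun q =>
              let k : Int := ((c :: t).count (Char.ofNat (q + 65).toNat) : Int)
              if 1 < k then some (Char.ofNat (q + 65).toNat, k) else none) =
              (PySem.List.pyRange (a + 1) 26 1).filterMap (fun q =>
              let k : Int := ((t.dropWhile (fun x => x == c)).count (Char.ofNat (q + 65).toNat) : Int)
              if 1 < k then some (Char.ofNat (q + 65).toNat, k) else none) := by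
            apply List.filterMap_congr
            intro q hq
            have hq' := (PySem.List.mem_pyRange_one).mp hq
            have hne : Char.ofNat (q + 65).toNat ≠ c := by
              intro he
              have := letter_toNat q (by omega) (by omega)
              rw [he] at this
              omega
            rw [hcount_ne _ hne]
          have hih := ih (n - 1) (a + 1) (t.dropWhile (fun x => x == c))
            (by simp at hm ⊢; omega) (by omega) (by omega) hrest_pw
            (fun x hx _ _ => by
              have := hrest_gt x hx
              omega)
          rw [runsOf]
          simp only [hcnt]
          rw [htail, ← hih]
          by_cases hk : (1:Int) < 1 + ((t.takeWhile (fun x => x == c)).length : Int)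
          · rw [if_pos ⟨hup.1, hup.2, hk⟩, if_pos hk, hletter]
            simp
          · rw [if_neg (by tauto), if_neg hk]
            simp
        · -- letter a is absent from l (strictly below its minimum c)
          have hcnt0 : ((c :: t).count (Char.ofNat (a + 65).toNat) : Int) = 0 := by
            have hnm : Char.ofNat (a + 65).toNat ∉ c :: t := by
              intro hmem
              have hlt := letter_toNat a h0 (by omega)
              rcases List.mem_cons.mp hmem with h | h
              · rw [h] at hlt; omega
              · have h2 : (c.toNat : Int) ≤ ((Char.ofNat (a + 65).toNat).toNat : Int) :=
                  Int.ofNat_le.mpr (hmin _ h)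
                omega
            rw [List.count_eq_zero.mpr hnm]
            simp
          have hih := ih (n - 1) (a + 1) (c :: t)
            (by simp at hm ⊢; omega) (by omega) (by omega)
            (List.pairwise_cons.mpr hpw)
            (fun x hx h1 h2 => by
              rcases List.mem_cons.mp hx with h | h
              · subst h; omega
              · have := hmin _ h
                omega)
          simp only [hcnt0]
          rw [if_neg (by omega), ← hih]
      · -- non-letter head: the run affects no letter count and emits nothing
        have hne : ∀ q : Int, a ≤ q → q < 26 → Char.ofNat (q + 65).toNat ≠ c := by
          intro q hq1 hq2 he
          apply hup
          rw [← he, char_upper_iff]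
          have := letter_toNat q (by omega) (by omega)
          omega
        have hih := ih n a (t.dropWhile (fun x => x == c))
          (by simp at hm ⊢; omega) h0 h26 hrest_pw
          (fun x hx h1 h2 => hub x (List.mem_cons_of_mem _ (hrest_sub.mem hx)) h1 h2)
        rw [runsOf, if_neg (by tauto), List.nil_append, hih]
        apply List.filterMap_congr
        intro q hq
        have hq' := (PySem.List.mem_pyRange_one).mp hq
        rw [hcount_ne _ (hne q hq'.1 hq'.2)]

-- on a sorted list the run list is exactly the per-letter count list
lemma runsOf_sorted : ∀ (n : Nat) (a : Int) (l : List Char),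
    0 ≤ a → a + n = 26 →
    l.Pairwise (fun x y => x.toNat ≤ y.toNat) →
    (∀ c ∈ l, 'A' ≤ c → c ≤ 'Z' → a + 65 ≤ (c.toNat : Int)) →
    runsOf l = (PySem.List.pyRange a 26 1).filterMap (fun q =>
      let k : Int := (l.count (Char.ofNat (q + 65).toNat) : Int)
      if 1 < k then some (Char.ofNat (q + 65).toNat, k) else none) := by
  intro n a l h0 h26 hpw hub
  exact runsOf_sorted_aux (n + l.length) n a l le_rfl h0 h26 hpw hub

-- ===== VERDICT (by name: the statement is the Claim_ definition above) =====
theorem treba_spec : Claim_equal_treba := by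
  intro v _
  show treba v = treba_alt v
  have hA := treba_eq_foldl v 26 0 false [] [] le_rfl (by omega) (by simp)
  norm_num at hA
  have hpair : (PySem.List.sorted v.toList (fun c => c.toNat) false).Pairwise
      (fun x y => x.toNat ≤ y.toNat) := PySem.List.sorted_pairwise v.toList (fun c => c.toNat)
  have hperm : (PySem.List.sorted v.toList (fun c => c.toNat) false).Perm v.toList :=
    PySem.List.sorted_perm v.toList (fun c => c.toNat) false
  have hC := runsOf_sorted 26 0 (PySem.List.sorted v.toList (fun c => c.toNat) false)
    le_rfl (by norm_num) hpair (fun c _ h1 _ => by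
      have : (65:Nat) ≤ c.toNat := h1
      omega)
  have hcongr : (PySem.List.pyRange 0 26 1).filterMap (emitA v) =
      (PySem.List.pyRange 0 26 1).filterMap (fun q =>
        let k : Int := ((PySem.List.sorted v.toList (fun c => c.toNat) false).count
          (Char.ofNat (q + 65).toNat) : Int)
        if 1 < k then some (Char.ofNat (q + 65).toNat, k) else none) := by
    apply List.filterMap_congr
    intro q _
    simp only [emitA, str_count_single, hperm.count_eq]
  rw [treba, hA, hcongr, ← hC, ← trebaRun_eq_foldl _ _ _ le_rfl]
  rfl
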